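-- pv_equiv track=rewrite | github.com/simoncraig90/poker_game | python/eval_lab/hit_rate_report_v2.py | _pot_class_from_ah
-- ===== SOURCE A (Python) =====
-- def _pot_class_from_ah(action_history):
--     """Derive pot class from action_history (same logic as Rust classify_pot)."""
--     n_agg = 0
--     had_caller = False
--     squeeze = False
--     for entry in action_history:
--         parts = entry.split(":")
--         if len(parts) < 2:
--             continue
--         action = parts[1]
--         if action in ("BET_TO", "RAISE_TO"):
--             if n_agg >= 1 and had_caller:
--                 squeeze = True
--             n_agg += 1
--             had_caller = False
--         elif action == "CALL":
--             if n_agg >= 1: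
--                 had_caller = True
--     if squeeze:
--         return "squeeze"
--     return {0: "limped", 1: "srp", 2: "3bp"}.get(n_agg, "4bp+")
-- ===== SOURCE B (Python) =====
-- AGG = ("BET_TO", "RAISE_TO")
--
--
-- def _pot_class_from_ah(action_history):
--     """Derive pot class from action_history (pattern-based reformulation)."""
--     acts = [p[1] for p in (e.split(":") for e in action_history) if len(p) >= 2]
--     n_agg = len([a for a in acts if a in AGG])
--     if _has_squeeze(acts):
--         return "squeeze"
--     return {0: "limped", 1: "srp", 2: "3bp"}.get(n_agg, "4bp+")
--
--
-- def _has_squeeze(acts):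
--     # squeeze pattern: some CALL with an aggressive action before it and another after it
--     for j, a in enumerate(acts):
--         if a == "CALL" and any(x in AGG for x in acts[:j]) and any(x in AGG for x in acts[j + 1:]):
--             return True
--     return False
-- ===== Notes on version B (the rewrite author's own statement) =====
-- stated objective: simpler
-- what changed: Replaced A's three-variable state machine (n_agg/had_caller/squeeze updated per entry) by a declarative pattern check: extract the action list once, count aggressive actions, and detect squeeze as 'some CALL with an aggressive action before and after it'.
import Mathlib
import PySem

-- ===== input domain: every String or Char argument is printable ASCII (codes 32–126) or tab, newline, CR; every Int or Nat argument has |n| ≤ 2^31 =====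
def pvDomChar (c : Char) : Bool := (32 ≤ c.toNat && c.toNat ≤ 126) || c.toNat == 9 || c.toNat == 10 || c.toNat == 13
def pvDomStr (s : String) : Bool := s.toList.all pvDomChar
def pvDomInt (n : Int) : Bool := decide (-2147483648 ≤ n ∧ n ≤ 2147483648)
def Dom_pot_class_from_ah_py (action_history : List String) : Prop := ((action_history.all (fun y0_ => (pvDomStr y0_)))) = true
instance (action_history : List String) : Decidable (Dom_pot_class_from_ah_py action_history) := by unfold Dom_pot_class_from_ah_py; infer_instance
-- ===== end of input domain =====

-- B replaces A's per-entry state machine by a declarative pattern check (extract actions once,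
-- count aggressive ones, squeeze = some CALL with an aggressive action before and after it); simpler to read, not faster.

-- ===== PORT A =====
-- ':'-split via PySem.Str.split? (separator nonempty, so .getD [] never fires);
-- `continue` on len(parts) < 2 = identity step of the fold.
def pot_class_from_ah_py (action_history : List String) : String :=
  let st : Int × Bool × Bool := action_history.foldl (fun st entry =>
    match (PySem.Str.split? entry ":").getD [] with
    | _ :: action :: _ =>
      if action == "BET_TO" || action == "RAISE_TO" then
        (st.1 + 1, false, if 1 ≤ st.1 ∧ st.2.1 then true else st.2.2)
      else if action == "CALL" then
        (st.1, if 1 ≤ st.1 then true else st.2.1, st.2.2)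
      else st
    | _ => st) (0, false, false)
  if st.2.2 then "squeeze"
  else (PySem.Dict.ofList [((0 : Int), "limped"), (1, "srp"), (2, "3bp")]).getD st.1 "4bp+"

-- ===== PORT B =====
def pvIsAgg (a : String) : Bool := a == "BET_TO" || a == "RAISE_TO"  -- `a in AGG`

-- `acts[:j]` / `acts[j+1:]` with j an enumerate index (≥ 0) ported as take/drop,
-- exact for nonnegative in-range slice bounds.
def pvHasSqueeze (acts : List String) : Bool :=
  (PySem.List.enumerate acts).any (fun ja =>
    ja.2 == "CALL" && (acts.take ja.1.toNat).any pvIsAgg && (acts.drop (ja.1.toNat + 1)).any pvIsAgg)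

-- `[p[1] for p in ... if len(p) >= 2]`: the guard makes p[1] safe, so it is ported as p[1]?
def pot_class_from_ah_py_alt (action_history : List String) : String :=
  let acts := action_history.filterMap (fun e =>
    let p := (PySem.Str.split? e ":").getD []
    if 2 ≤ p.length then p[1]? else none)
  let n_agg : Int := (acts.filter (fun a => pvIsAgg a)).length
  if pvHasSqueeze acts then "squeeze"
  else (PySem.Dict.ofList [((0 : Int), "limped"), (1, "srp"), (2, "3bp")]).getD n_agg "4bp+"

-- ===== PRECONDITION & SPEC =====
def Spec_pot_class_from_ah_py (action_history : List String) (out : String) : Prop := out = pot_class_from_ah_py_alt action_history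
instance (action_history : List String) (out : String) : Decidable (Spec_pot_class_from_ah_py action_history out) := by unfold Spec_pot_class_from_ah_py; infer_instance

-- ===== CLAIM (what is proved, stated in full; the proofs are below) =====
def Claim_equal_pot_class_from_ah_py : Prop := ∀ (action_history : List String), Dom_pot_class_from_ah_py action_history → Spec_pot_class_from_ah_py action_history (pot_class_from_ah_py action_history)

-- ===== LEMMAS AND PROOFS =====

-- the action extracted from one entry (parts[1] when the split has >= 2 parts)
def pvExtr (e : String) : Option String :=
  match (PySem.Str.split? e ":").getD [] with
  | _ :: a :: _ => some a
  | _ => none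

-- A's loop body as a step on extracted actions
def pvStep (st : Int × Bool × Bool) (a : String) : Int × Bool × Bool :=
  if a == "BET_TO" || a == "RAISE_TO" then
    (st.1 + 1, false, if 1 ≤ st.1 ∧ st.2.1 then true else st.2.2)
  else if a == "CALL" then
    (st.1, if 1 ≤ st.1 then true else st.2.1, st.2.2)
  else st

-- "some CALL in r followed (later) by an aggressive action"
def pvAC : List String → Bool
  | [] => false
  | a :: r => if a == "CALL" then (r.any pvIsAgg || pvAC r) else pvAC r

-- "an aggressive action, later a CALL, later another aggressive action, all within r"
def pvSQ : List String → Bool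
  | [] => false
  | a :: r => if pvIsAgg a then (pvAC r || pvSQ r) else pvSQ r

lemma pv_fold_eq (l : List String) (st : Int × Bool × Bool) :
    l.foldl (fun st entry =>
      match (PySem.Str.split? entry ":").getD [] with
      | _ :: action :: _ =>
        if action == "BET_TO" || action == "RAISE_TO" then
          (st.1 + 1, false, if 1 ≤ st.1 ∧ st.2.1 then true else st.2.2)
        else if action == "CALL" then
          (st.1, if 1 ≤ st.1 then true else st.2.1, st.2.2)
        else st
      | _ => st) st
    = (l.filterMap pvExtr).foldl pvStep st := by
  induction l generalizing st with
  | nil => rfl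
  | cons e t ih =>
    simp only [List.foldl_cons, List.filterMap_cons, pvExtr]
    rcases h : (PySem.Str.split? e ":").getD [] with _ | ⟨x, _ | ⟨y, tl⟩⟩
    · exact ih st
    · exact ih st
    · exact ih (pvStep st y)

lemma pv_fold_n (acts : List String) : ∀ (n : Int) (hc sq : Bool),
    (acts.foldl pvStep (n, hc, sq)).1 = n + (acts.countP pvIsAgg : Int) := by
  induction acts with
  | nil => intro n hc sq; simp
  | cons a t ih =>
    intro n hc sq
    simp only [List.foldl_cons, List.countP_cons, pvStep, pvIsAgg]
    by_cases hagg : (a == "BET_TO" || a == "RAISE_TO") = true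
    · simp only [hagg, if_true, ih]
      push_cast
      ring
    · simp only [Bool.not_eq_true] at hagg
      simp only [hagg, Bool.false_eq_true, if_false]
      split_ifs <;> simp [ih]

lemma pv_agg_ne_call {a : String} (h : pvIsAgg a = true) : (a == "CALL") = false := by
  unfold pvIsAgg at h
  rcases Bool.or_eq_true_iff.mp h with h | h <;>
    · have := eq_of_beq h; subst this; decide
lemma pvSQ_imp : ∀ r : List String, pvSQ r = true → pvAC r = true := by
  intro r; induction r with
  | nil => simp [pvSQ]
  | cons a t ih =>
    by_cases hagg : pvIsAgg a = true
    · have hne := pv_agg_ne_call hagg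
      simp only [pvSQ, pvAC, hagg, hne, if_true, if_false, Bool.false_eq_true]
      intro h
      rcases Bool.or_eq_true_iff.mp h with h | h
      · exact h
      · exact ih h
    · simp only [Bool.not_eq_true] at hagg
      simp only [pvSQ, pvAC, hagg, Bool.false_eq_true, if_false]
      intro h
      by_cases hc : (a == "CALL") = true <;> simp [hc, ih h]
lemma pv_fold_sq (acts : List String) : ∀ (n : Int) (hc sq : Bool), 0 ≤ n →
    (acts.foldl pvStep (n, hc, sq)).2.2
      = (sq || (decide (1 ≤ n) && hc && acts.any pvIsAgg)
            || (decide (1 ≤ n) && pvAC acts) || pvSQ acts) := by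
  induction acts with
  | nil => intro n hc sq _; simp [pvAC, pvSQ]
  | cons a t ih =>
    intro n hc sq hn
    simp only [List.foldl_cons, List.any_cons]
    by_cases hagg : pvIsAgg a = true
    · have hne := pv_agg_ne_call hagg
      have hstep : pvStep (n, hc, sq) a
          = (n + 1, false, if 1 ≤ n ∧ hc then true else sq) := by
        unfold pvIsAgg at hagg; simp [pvStep, hagg]
      rw [hstep, ih _ _ _ (by omega)]
      clear ih hstep
      have h1 : decide (1 ≤ n + 1) = true := by simp; omega
      simp only [pvAC, pvSQ, hne, hagg, if_true, if_false, Bool.false_eq_true, h1,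
        Bool.true_and, Bool.and_false, Bool.false_and, Bool.or_false, Bool.true_or]
      cases h2 : pvSQ t
      · cases hd : decide ((1 : Int) ≤ n) <;> cases hc <;> cases sq <;> cases h3 : pvAC t <;>
          simp_all
      · have h3 := pvSQ_imp t h2
        cases hd : decide ((1 : Int) ≤ n) <;> cases hc <;> cases sq <;> simp_all
    · simp only [Bool.not_eq_true] at hagg
      have hagg' : (a == "BET_TO" || a == "RAISE_TO") = false := by simpa [pvIsAgg] using hagg
      by_cases hc' : (a == "CALL") = true
      · have hstep : pvStep (n, hc, sq) a
            = (n, if 1 ≤ n then true else hc, sq) := by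
          simp [pvStep, hagg', hc']
        rw [hstep, ih _ _ _ hn]
        clear ih hstep
        simp only [pvAC, pvSQ, hc', hagg, if_true, Bool.false_eq_true, if_false]
        cases hd : decide ((1 : Int) ≤ n) <;> cases hc <;> cases sq <;>
          cases h2 : t.any pvIsAgg <;> simp_all
      · simp only [Bool.not_eq_true] at hc'
        have hstep : pvStep (n, hc, sq) a = (n, hc, sq) := by
          simp [pvStep, hagg', hc']
        rw [hstep, ih _ _ _ hn]
        simp [pvAC, pvSQ, hc', hagg]
lemma pv_enum_aux (acts : List String) : ∀ (pre : List String),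
    ((PySem.List.enumerate acts (pre.length : Int)).any (fun ja =>
        ja.2 == "CALL" && ((pre ++ acts).take ja.1.toNat).any pvIsAgg
          && ((pre ++ acts).drop (ja.1.toNat + 1)).any pvIsAgg))
      = (if pre.any pvIsAgg then pvAC acts else pvSQ acts) := by
  induction acts with
  | nil => intro pre; simp [PySem.List.enumerate, pvAC, pvSQ]
  | cons a r ih =>
    intro pre
    rw [PySem.List.enumerate_cons, List.any_cons]
    have htake : ((pre ++ a :: r).take ((pre.length : Int)).toNat) = pre := by
      simp [List.take_left]
    have hdrop : (pre ++ a :: r).drop (((pre.length : Int)).toNat + 1) = r := by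
      have h1 : (pre ++ a :: r) = (pre ++ [a]) ++ r := by simp
      rw [h1, show ((pre.length : Int)).toNat + 1 = (pre ++ [a]).length by simp, List.drop_left]
    have hIH := ih (pre ++ [a])
    simp only [List.append_assoc, List.singleton_append, List.length_append,
      List.length_singleton, Nat.cast_add, Nat.cast_one, List.any_append,
      List.any_cons, List.any_nil, Bool.or_false] at hIH
    rw [hIH, htake, hdrop]
    by_cases hagg : pvIsAgg a = true
    · have hne := pv_agg_ne_call hagg
      simp only [pvAC, pvSQ, hne, hagg, if_true, if_false, Bool.false_eq_true, Bool.false_and,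
        Bool.and_false, Bool.false_or, Bool.or_true, Bool.true_or]
      cases h2 : pvSQ r
      · by_cases hp : pre.any pvIsAgg = true <;> cases h3 : pvAC r <;> simp_all
      · have h3 := pvSQ_imp r h2
        by_cases hp : pre.any pvIsAgg = true <;> simp_all
    · simp only [Bool.not_eq_true] at hagg
      by_cases hc : (a == "CALL") = true
      · simp only [pvAC, pvSQ, hc, hagg, if_true, Bool.false_eq_true, if_false, Bool.true_and]
        cases hp : pre.any pvIsAgg <;> cases h2 : r.any pvIsAgg <;>
          simp [hp, h2, pvAC, pvSQ, hc, hagg]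
      · simp only [Bool.not_eq_true] at hc
        simp [pvAC, pvSQ, hc, hagg]

lemma pv_enum_nil (acts : List String) : pvHasSqueeze acts = pvSQ acts := by
  have h := pv_enum_aux acts []
  simpa [pvHasSqueeze] using h

-- ===== VERDICT (by name: the statement is the Claim_ definition above) =====
theorem pot_class_from_ah_py_spec : Claim_equal_pot_class_from_ah_py := by
  intro ah _
  show pot_class_from_ah_py ah = pot_class_from_ah_py_alt ah
  unfold pot_class_from_ah_py pot_class_from_ah_py_alt
  have hx : ah.filterMap (fun e =>
      let p := (PySem.Str.split? e ":").getD []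
      if 2 ≤ p.length then p[1]? else none) = ah.filterMap pvExtr := by
    apply List.filterMap_congr
    intro e _
    unfold pvExtr
    rcases (PySem.Str.split? e ":").getD [] with _ | ⟨x, _ | ⟨y, tl⟩⟩ <;> simp
  have hy : (fun a => pvIsAgg a) = pvIsAgg := rfl
  simp only [hx, hy, pv_fold_eq, pv_enum_nil]
  have h1 := pv_fold_sq (ah.filterMap pvExtr) 0 false false (le_refl 0)
  have h2 := pv_fold_n (ah.filterMap pvExtr) 0 false false
  rw [h1, h2, show decide ((1 : Int) ≤ 0) = false from rfl]
  simp [← List.countP_eq_length_filter]
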